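-- pv_equiv track=rewrite | github.com/draisel147/natiphorm_CODE_NU | Python/Algorithm/lab2.py | categorize_numbers
-- ===== SOURCE A (Python) =====
-- def categorize_numbers(numbers):
--     low_count = sum(1 for num in numbers if num <= 30)
--     mid_count = 0
--     high_count = 0
--     damage_count = 0
--     consecutive_high_count = 0
--
--     for num in numbers:
--         if 61 <= num <= 100:
--             if high_count == 0:
--                 damage_count += 1
--             high_count += 1
--             consecutive_high_count += 1
--
--             if consecutive_high_count > 2:  # แก้ไขตรงนี้ให้นับความเสียหายเมื่อตัวเลข 61-100 ติดกันมากกว่า 2 ตัว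
--                 damage_count += 1
--         else:
--             consecutive_high_count = 0
--             if 31 <= num <= 60:
--                 mid_count += 1
--
--     return low_count, mid_count, high_count, damage_count
-- ===== SOURCE B (Python) =====
-- def categorize_numbers(numbers):
--     nums = list(numbers)
--     low_count = sum(1 for n in nums if n <= 30)
--     mid_count = sum(1 for n in nums if 31 <= n <= 60)
--     high_count = sum(1 for n in nums if 61 <= n <= 100)
--     hs = [61 <= n <= 100 for n in nums]
--     damage_count = (1 if high_count else 0) + sum(
--         1 if a and b and c else 0 for a, b, c in zip(hs, hs[1:], hs[2:]))
--     return low_count, mid_count, high_count, damage_count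
-- ===== Notes on version B (the rewrite author's own statement) =====
-- stated objective: idiomatic
-- what changed: Replaced A's single stateful loop (running consecutive-high counter, first-high flag, mid counter) by independent counting comprehensions plus a sliding triple-window zip(hs, hs[1:], hs[2:]) that counts each high element whose two predecessors are also high, which is exactly when A's consecutive counter exceeds 2.
import Mathlib
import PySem

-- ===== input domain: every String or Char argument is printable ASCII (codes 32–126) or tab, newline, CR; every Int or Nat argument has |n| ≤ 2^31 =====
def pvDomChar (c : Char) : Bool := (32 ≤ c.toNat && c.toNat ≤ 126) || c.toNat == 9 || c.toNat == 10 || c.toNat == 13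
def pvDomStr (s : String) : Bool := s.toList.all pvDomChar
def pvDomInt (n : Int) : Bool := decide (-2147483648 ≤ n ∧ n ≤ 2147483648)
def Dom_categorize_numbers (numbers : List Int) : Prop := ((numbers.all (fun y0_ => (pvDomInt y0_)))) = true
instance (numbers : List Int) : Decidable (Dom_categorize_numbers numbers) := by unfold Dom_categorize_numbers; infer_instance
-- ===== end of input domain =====

-- B replaces A's stateful consecutive-counter loop by independent counts and a
-- sliding triple-window count over the high/low flag list (idiomatic; same cost).

-- ===== PORT A =====
-- the body of A's for-loop over state (mid_count, high_count, damage_count, consecutive_high_count)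
def pvStepA (s : Int × Int × Int × Int) (num : Int) : Int × Int × Int × Int :=
  let (mid, high, damage, consec) := s
  if 61 ≤ num ∧ num ≤ 100 then
    let damage := if high = 0 then damage + 1 else damage
    let high := high + 1
    let consec := consec + 1
    let damage := if consec > 2 then damage + 1 else damage
    (mid, high, damage, consec)
  else
    let _consec : Int := 0
    let mid := if 31 ≤ num ∧ num ≤ 60 then mid + 1 else mid
    (mid, high, damage, _consec)

def categorize_numbers (numbers : List Int) : Int × Int × Int × Int :=
  let low_count := numbers.foldl (fun acc num => if num ≤ 30 then acc + 1 else acc) (0 : Int)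
  let st := numbers.foldl pvStepA ((0 : Int), (0 : Int), (0 : Int), (0 : Int))
  (low_count, st.1, st.2.1, st.2.2.1)

-- ===== PORT B =====
def categorize_numbers_alt (numbers : List Int) : Int × Int × Int × Int :=
  let low_count := numbers.foldl (fun acc n => if n ≤ 30 then acc + 1 else acc) (0 : Int)
  let mid_count := numbers.foldl (fun acc n => if 31 ≤ n ∧ n ≤ 60 then acc + 1 else acc) (0 : Int)
  let high_count := numbers.foldl (fun acc n => if 61 ≤ n ∧ n ≤ 100 then acc + 1 else acc) (0 : Int)
  let hs := numbers.map (fun n => decide (61 ≤ n ∧ n ≤ 100))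
  let tri := (List.zip hs (List.zip (hs.drop 1) (hs.drop 2))).foldl
      (fun acc x => acc + (if x.1 && x.2.1 && x.2.2 then 1 else 0)) (0 : Int)
  let damage_count := (if high_count ≠ 0 then (1 : Int) else 0) + tri
  (low_count, mid_count, high_count, damage_count)

-- ===== PRECONDITION & SPEC =====
def Spec_categorize_numbers (numbers : List Int) (out : Int × Int × Int × Int) : Prop := out = categorize_numbers_alt numbers
instance (numbers : List Int) (out : Int × Int × Int × Int) : Decidable (Spec_categorize_numbers numbers out) := by unfold Spec_categorize_numbers; infer_instance

-- ===== CLAIM (what is proved, stated in full; the proofs are below) =====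
def Claim_equal_categorize_numbers : Prop := ∀ (numbers : List Int), Dom_categorize_numbers numbers → Spec_categorize_numbers numbers (categorize_numbers numbers)

-- ===== LEMMAS AND PROOFS =====

-- proof-side characterisations
def pvIsHigh (n : Int) : Bool := decide (61 ≤ n ∧ n ≤ 100)

def pvMidC : List Int → Int
  | [] => 0
  | n :: t => (if 31 ≤ n ∧ n ≤ 60 then 1 else 0) + pvMidC t

def pvHighC : List Int → Int
  | [] => 0
  | n :: t => (if 61 ≤ n ∧ n ≤ 100 then 1 else 0) + pvHighC t

def pvTrailC (c : Int) : List Int → Int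
  | [] => c
  | n :: t => pvTrailC (if 61 ≤ n ∧ n ≤ 100 then c + 1 else 0) t

-- triple-window count with two look-back bits p (two ago) and q (previous)
def pvT (p q : Bool) : List Bool → Int
  | [] => 0
  | b :: t => (if p && q && b then 1 else 0) + pvT q b t

theorem pvMidC_fold (l : List Int) (a : Int) :
    l.foldl (fun acc n => if 31 ≤ n ∧ n ≤ 60 then acc + 1 else acc) a = a + pvMidC l := by
  induction l generalizing a with
  | nil => simp [pvMidC]
  | cons n t ih => simp only [List.foldl_cons, pvMidC, ih]; split <;> ring

theorem pvHighC_fold (l : List Int) (a : Int) :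
    l.foldl (fun acc n => if 61 ≤ n ∧ n ≤ 100 then acc + 1 else acc) a = a + pvHighC l := by
  induction l generalizing a with
  | nil => simp [pvHighC]
  | cons n t ih => simp only [List.foldl_cons, pvHighC, ih]; split <;> ring

theorem pvHighC_nonneg (l : List Int) : 0 ≤ pvHighC l := by
  induction l with
  | nil => simp [pvHighC]
  | cons n t ih => simp only [pvHighC]; split <;> omega

theorem pvHighC_ne_zero_iff (l : List Int) :
    (pvHighC l ≠ 0) ↔ (l.any pvIsHigh = true) := by
  induction l with
  | nil => simp [pvHighC]
  | cons n t ih =>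
      have ht := pvHighC_nonneg t
      by_cases h : 61 ≤ n ∧ n ≤ 100
      · have h1 : pvHighC (n :: t) = 1 + pvHighC t := by simp [pvHighC, h]
        rw [h1]
        simp [List.any_cons, pvIsHigh, h]
        omega
      · have h1 : pvHighC (n :: t) = pvHighC t := by simp [pvHighC, h]
        rw [h1, ih]
        simp [List.any_cons, pvIsHigh, h]

-- the zip-window fold of B, shifted by two look-back bits, equals pvT
theorem pvZip_fold_eq (bs : List Bool) : ∀ (p q : Bool) (a : Int),
    (List.zip (p :: q :: bs) (List.zip ((p :: q :: bs).drop 1) ((p :: q :: bs).drop 2))).foldl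
      (fun acc x => acc + (if x.1 && x.2.1 && x.2.2 then 1 else 0)) a = a + pvT p q bs := by
  induction bs with
  | nil => intro p q a; simp [pvT]
  | cons b t ih =>
      intro p q a
      have h := ih q b (a + if (p && q && b) = true then (1 : Int) else 0)
      simp only [List.drop, List.zip_cons_cons, List.foldl_cons] at h ⊢
      simp only [pvT]
      rw [h]
      ring

theorem pvZip_fold_base (bs : List Bool) :
    (List.zip bs (List.zip (bs.drop 1) (bs.drop 2))).foldl
      (fun acc x => acc + (if x.1 && x.2.1 && x.2.2 then 1 else 0)) (0 : Int)
      = pvT false false bs := by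
  match bs with
  | [] => simp [pvT]
  | [x] => simp [pvT]
  | x :: y :: t =>
      have h := pvZip_fold_eq t x y 0
      simp only [List.drop] at h ⊢
      rw [h]
      simp [pvT]

-- main characterisation of A's loop
theorem pvLoopA_char (l : List Int) : ∀ (mid high damage c : Int) (p q : Bool),
    0 ≤ high → 0 ≤ c → ((p && q) = decide (2 ≤ c)) → (q = decide (1 ≤ c)) →
    l.foldl pvStepA (mid, high, damage, c) =
      (mid + pvMidC l, high + pvHighC l,
       damage + (if high = 0 ∧ l.any pvIsHigh = true then 1 else 0)
              + pvT p q (l.map pvIsHigh),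
       pvTrailC c l) := by
  induction l with
  | nil => intro mid high damage c p q _ _ _ _; simp [pvMidC, pvHighC, pvTrailC, pvT]
  | cons n t ih =>
      intro mid high damage c p q hh hc hpq hq
      by_cases hn : 61 ≤ n ∧ n ≤ 100
      · have hb : pvIsHigh n = true := by simp [pvIsHigh, hn]
        have hnm : ¬ (31 ≤ n ∧ n ≤ 60) := by omega
        have hstep : pvStepA (mid, high, damage, c) n =
            (mid, high + 1,
             (if high = 0 then damage + 1 else damage) + (if c + 1 > 2 then 1 else 0), c + 1) := by
          by_cases h3 : c + 1 > 2 <;> by_cases h0 : high = 0 <;>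
            simp [pvStepA, hn, h3, h0]
        have hpq' : (q && true) = decide (2 ≤ c + 1) := by
          rw [Bool.and_true, hq]; simp; omega
        have hq' : (true : Bool) = decide (1 ≤ c + 1) := by simp; omega
        rw [List.foldl_cons, hstep,
            ih mid (high + 1) _ (c + 1) q true (by omega) (by omega) hpq' hq']
        have e1 : pvMidC (n :: t) = pvMidC t := by simp [pvMidC, hnm]
        have e2 : pvHighC (n :: t) = 1 + pvHighC t := by simp [pvHighC, hn]
        have e4 : pvTrailC c (n :: t) = pvTrailC (c + 1) t := by simp [pvTrailC, hn]
        have e3 : pvT p q (List.map pvIsHigh (n :: t))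
            = (if c + 1 > 2 then 1 else 0) + pvT q true (List.map pvIsHigh t) := by
          simp only [List.map_cons, hb, pvT, Bool.and_true, hpq]
          by_cases h2 : 2 ≤ c
          · rw [if_pos (by simp [h2]), if_pos (by omega)]
          · rw [if_neg (by simp [h2]), if_neg (by omega)]
        have e5 : (if high + 1 = 0 ∧ t.any pvIsHigh = true then (1 : Int) else 0) = 0 := by
          rw [if_neg]; intro hx; omega
        have e6 : (if high = 0 ∧ (n :: t).any pvIsHigh = true then (1 : Int) else 0)
            = (if high = 0 then 1 else 0) := by
          simp [List.any_cons, hb]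
        rw [e1, e2, e4, e3, e5, e6]
        simp only [Prod.mk.injEq, true_and, and_true]
        constructor
        · ring
        · by_cases h0 : high = 0 <;> by_cases h3 : 1 + c > 2 <;>
            simp only [h0, h3, if_true, if_false, if_pos, if_neg] <;>
            split_ifs <;> ring
      · have hb : pvIsHigh n = false := by simp [pvIsHigh, hn]
        have hstep : pvStepA (mid, high, damage, c) n =
            ((if 31 ≤ n ∧ n ≤ 60 then mid + 1 else mid), high, damage, 0) := by
          simp [pvStepA, hn]
        have hpq' : (q && false) = decide (2 ≤ (0 : Int)) := by simp
        have hq' : (false : Bool) = decide (1 ≤ (0 : Int)) := by simp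
        rw [List.foldl_cons, hstep,
            ih _ high damage 0 q false hh (by omega) hpq' hq']
        have e1 : pvMidC (n :: t) = (if 31 ≤ n ∧ n ≤ 60 then 1 else 0) + pvMidC t := rfl
        have e2 : pvHighC (n :: t) = pvHighC t := by simp [pvHighC, hn]
        have e4 : pvTrailC c (n :: t) = pvTrailC 0 t := by simp [pvTrailC, hn]
        have e3 : pvT p q (List.map pvIsHigh (n :: t)) = pvT q false (List.map pvIsHigh t) := by
          simp [List.map_cons, hb, pvT]
        have e6 : (n :: t).any pvIsHigh = t.any pvIsHigh := by simp [List.any_cons, hb]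
        rw [e1, e2, e4, e3, e6]
        simp only [Prod.mk.injEq, true_and, and_true]
        split_ifs <;> ring

-- ===== VERDICT (by name: the statement is the Claim_ definition above) =====
theorem categorize_numbers_spec : Claim_equal_categorize_numbers := by
  intro numbers _
  unfold Spec_categorize_numbers categorize_numbers categorize_numbers_alt
  have hloop := pvLoopA_char numbers 0 0 0 0 false false (by omega) (by omega) (by simp) (by simp)
  have hmid := pvMidC_fold numbers 0
  have hhigh := pvHighC_fold numbers 0
  have hzip := pvZip_fold_base (numbers.map pvIsHigh)
  have hne := pvHighC_ne_zero_iff numbers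
  simp only [pvIsHigh] at hloop hne
  simp only [hloop, hmid, hhigh, Prod.mk.injEq]
  refine ⟨trivial, trivial, trivial, ?_⟩
  by_cases h : (numbers.any fun n => decide (61 ≤ n ∧ n ≤ 100)) = true
  · rw [if_pos ⟨trivial, h⟩, if_pos (by simpa using hne.mpr h)]
    rw [show (fun n : Int => decide (61 ≤ n ∧ n ≤ 100)) = pvIsHigh from rfl, hzip]
    ring
  · rw [if_neg (fun hx => h hx.2), if_neg (by simpa using fun hh => h (hne.mp hh))]
    rw [show (fun n : Int => decide (61 ≤ n ∧ n ≤ 100)) = pvIsHigh from rfl, hzip]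
    ring
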